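/-
  THE SEGMENTS OF codebook_decode_deinterleave_repeat (design/CONTRACTS.md entry 55, "Segments of
  codebook_decode_deinterleave_repeat"; units codebook_decode_deinterleave_repeat.1 … .7 and .COMPOSITION of design/units.tsv). The
  function's `Spec` is Vorbis/Spec/Codebook.lean's `codebook_decode_deinterleave_repeat.spec`; here: one assertion per cut point
  (`Deint.At…`) and one CLAIM per segment. The arithmetic vocabulary is Vorbis/ResidueMapping/Arith.lean's (`Res.InterOK`,
  `Res.DeintInv`, `Res.clamp_ok`, `Res.DeintInner`, `Res.len_mul_ch_le`).

      .1  entry                      → AtHead (L.….cut9 = 10DE09H) ∨ AtEpilogue (cut3 = 10DC9EH; lookup_type = 0: error, eax = 0)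
      .2  AtHead ci pi eff td        → AtStore ci pi (cut10 = 10DF30H; td ≤ 0) ∨ AtSeq ci pi eff' zd td (cut6 = 10DD59H)
                                       ∨ AtPlain ci pi eff' zd td (cut7 = 10DD70H) ∨ AtFalse1 (cut11 = 10DF5FH) ∨ AtFalse2 (cut12 =
                                       10DF69H, FIX 10) ∨ AtEpilogue (after `error`)
      .3  AtSeq ci pi eff zd td      → AtJoin ci' pi' eff td (cut8 = 10DE04H)           loop 1938, the sequence arm
      .4  AtPlain ci pi eff zd td    → AtJoin ci' pi' eff td                             loop 1946, the other arm
      .5  AtJoin ci pi eff td        → AtHead ci pi eff (td − eff)                       `sub [rsp+78H], r15d`: IN THE ARGUMENT SLOT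
      .6  AtStore ∨ AtFalse1 ∨ AtFalse2  → AtEpilogue                                    the two int stores, eax := 1; eax := 0 twice
      .7  AtEpilogue                 → Returned                                          `add rsp, 38H`, six pops, ret
      COMPOSITION                    Claim1 → … → Claim7 → the function's `Calls`: induction on `total_decode` (`td`), which every
                                     round of .2 → .3 / .4 → .5 lowers by `eff ≥ 1`

  THE GHOST VALUES `ci` (c_inter), `pi` (p_inter), `eff` (effective), `zd` (z·dimensions), `td` (total_decode) ARE PARAMETERS of the
  assertions: the composition needs the measure, a segment's worker the values that registers and slots hold.

  Steady stack pointer: `e.rsp − 104` (six pushes, `sub rsp, 38H`). Slots (spelled the way the walker normalises `[rsp + k]`):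
  `[rsp+4]` = `e.rsp − 100` (`last` as a float, or z·dim on the non-sequence arm; also a dead copy of valid_bits inside DECODE);
  `[rsp+8]` = `e.rsp − 96` p_inter (dword); `[rsp+0CH]` = `e.rsp − 92` ch (dword); `[rsp+10H]` = `e.rsp − 88` outputs;
  `[rsp+18H]` = `e.rsp − 80` f; `[rsp+20H]` = `e.rsp − 72` c_inter_p; `[rsp+28H]` = `e.rsp − 64` p_inter_p; the two ARGUMENT slots
  are ABOVE the return address: `[rsp+70H]` = `e.rsp + 8` len (dword), `[rsp+78H]` = `e.rsp + 16` total_decode (dword).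
  Registers: r12 = c; ebp = c_inter; r15d = effective; r14d = z, then z·dim; r13d = i of the inner loops.
-/
import Vorbis.Spec.Codebook
namespace Vorbis.Spec.Deint
open X86 X86.User Asan

/-! ### The values of the contract, read off the entry state `e` -/

/-- `f`, the decoder object (rdi at entry). -/
abbrev fOf (e : State) : Nat := (e.reg .rdi).toNat

/-- `c`, the codebook (rsi at entry). -/
abbrev cOf (e : State) : Nat := (e.reg .rsi).toNat

/-- `outputs`, the table of `ch` float pointers (rdx at entry). -/
abbrev outsOf (e : State) : Nat := (e.reg .rdx).toNat

/-- `ch` (ecx at entry). -/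
abbrev chOf (e : State) : Nat := argU32 (e.reg .rcx)

/-- `c_inter_p` (r8 at entry). -/
abbrev cpOf (e : State) : Nat := (e.reg .r8).toNat

/-- `p_inter_p` (r9 at entry). -/
abbrev ppOf (e : State) : Nat := (e.reg .r9).toNat

/-- `len`, the first stack argument as the contract reads it: the dword at `[rsp + 8]` of the entry state. -/
abbrev lenOf (e : State) : Nat := e.mem.u32 ((e.reg .rsp).toNat + 8)

/-- `c->dimensions` as a number (K1: `1 ≤ dimensions ≤ 65535`), read at entry: no store of the function reaches the struct. -/
abbrev dimOf (e : State) : Nat := (Codebook.dimensions e.mem (cOf e)).toNat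

/-- `N(c)` as a number, read at entry. -/
abbrev nOf (e : State) : Nat := (Codebook.N e.mem (cOf e)).toNat

/-- The contract's `len` is the dword the code reads at `[rsp + 70H]` (= `e.rsp + 8`), in the entry memory. -/
theorem lenOf_eq (e : State) : lenOf e = e.mem.readLE (e.reg .rsp + 8) 4 := by
  have h : addr ((e.reg .rsp).toNat + 8) = e.reg .rsp + 8 := by
    rw [← addr_add_lit, addr_toNat]
  unfold lenOf Mem.u32
  rw [h]

/-- The contract's `total_decode` (`DeintPre.total_pos`) is the signed dword the code reads at `[rsp + 78H]` (= `e.rsp + 16`). -/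
theorem total_eq (e : State) :
    e.mem.i32 ((e.reg .rsp).toNat + 16) = sint32 (e.mem.readLE (e.reg .rsp + 16) 4) := by
  have h : addr ((e.reg .rsp).toNat + 16) = e.reg .rsp + 16 := by
    rw [← addr_add_lit, addr_toNat]
  rw [Mem.i32_def]
  unfold Mem.u32
  rw [h]

/-! ### What every cut point after the `lookup_type` test shares -/

/-- **What holds at every cut point of codebook_decode_deinterleave_repeat after the `lookup_type` test** (entered at `e`):
the frame facts; the precondition at the entry state; in the CURRENT memory `Bits f` with μ not increased (`reader`),
`CodebookOK c`, the separation of `*f` from the book, `lookup_type = 2` (K6 and the test at 10DC12H); the registers and slots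
that never change after the prologue (r12 = c; ch, outputs, f, the two int pointers in their spill slots; `len` in its argument
slot); and what the stores so far have NOT changed: the table `outputs[0 .. ch)`, the two ints `*c_inter_p`, `*p_inter_p`. -/
structure Common (others : List Obj) (frames : List (Nat × FrameLayout)) (Blk : Block → Prop) (len : Nat) (u₀ : State)
    (ret : Word) (e v : State) : Prop where
  mid : Mid u₀ (codebook_decode_deinterleave_repeat.spec others frames Blk len)
    L.codebook_decode_deinterleave_repeat.entry ret e (e.reg .rsp - 104) v
  pre : DeintPre others frames Blk len e
  reader : ReaderPost Blk len e.mem v.mem (fOf e)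
  cb : CodebookOK Blk v.mem (cOf e)
  apart : BookApart v.mem (fOf e) (cOf e)
  /-- no store of the function reaches the struct at `c`: every field (`dimensions`, `N(c)` of `dimOf` / `nOf`, the pointers)
  reads as at entry -/
  book : Codebook.SameFields e.mem v.mem (cOf e)
  /-- `lookup_type ≠ 0` was tested at entry; K6: then it is 2 (`multiplicands` is a block of `≥ 4·N·dimensions` bytes) -/
  type2 : Codebook.lookup_type v.mem (cOf e) = 2
  /-- r12 = c, from 10DBD3H to the epilogue -/
  c : v.reg .r12 = e.reg .rsi
  /-- `[rsp+0CH]` = ch -/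
  chSlot : v.mem.readLE (e.reg .rsp - 92) 4 = chOf e
  /-- `[rsp+10H]` = outputs -/
  outsSlot : UInt64.ofNat (v.mem.readLE (e.reg .rsp - 88) 8) = e.reg .rdx
  /-- `[rsp+18H]` = f (re-stored with the same value at 10DE43H) -/
  fSlot : UInt64.ofNat (v.mem.readLE (e.reg .rsp - 80) 8) = e.reg .rdi
  /-- `[rsp+20H]` = c_inter_p -/
  cpSlot : UInt64.ofNat (v.mem.readLE (e.reg .rsp - 72) 8) = e.reg .r8
  /-- `[rsp+28H]` = p_inter_p -/
  ppSlot : UInt64.ofNat (v.mem.readLE (e.reg .rsp - 64) 8) = e.reg .r9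
  /-- `[rsp+70H]` = len: the first argument slot is never written -/
  lenSlot : v.mem.readLE (e.reg .rsp + 8) 4 = lenOf e
  /-- the table of output pointers is as at entry (no float store reaches it: `DeintApart.winTable`; no store into `*f` of
  segment .2 and its callees does: `DeintApart.tableObj`) -/
  table : ∀ k, k < chOf e → v.mem.ptr (outsOf e + 8 * k) = e.mem.ptr (outsOf e + 8 * k)
  /-- `*c_inter_p` is as at entry (written only by segment .6) -/
  cInt : v.mem.i32 (cpOf e) = e.mem.i32 (cpOf e)
  /-- `*p_inter_p` is as at entry -/
  pInt : v.mem.i32 (ppOf e) = e.mem.i32 (ppOf e)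

/-- **Where the local copies of the position live** at the head, in the arms and at the join: ebp = c_inter, `[rsp+8]` =
p_inter, r15d = effective, `[rsp+78H]` (the SECOND ARGUMENT SLOT, `e.rsp + 16`) = total_decode as a signed dword. -/
structure Locals (e v : State) (ci pi eff : Nat) (td : Int) : Prop where
  ciReg : v.reg .rbp = UInt64.ofNat ci
  piSlot : v.mem.readLE (e.reg .rsp - 96) 4 = pi
  effReg : v.reg .r15 = UInt64.ofNat eff
  tdSlot : sint32 (v.mem.readLE (e.reg .rsp + 16) 4) = td

/-! ### The assertions -/

/-- **10DE09H, the head of `while (total_decode > 0)`** (loop 1901; CONTRACTS: "invariant of loop 1901 with the slots / registers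
of `regs`; lookup_type = 2; [rsp+0x78] = total_decode (any int)"): `0 ≤ c_inter < ch`, `pos = p_inter·ch + c_inter ≤ len·ch`,
`1 ≤ effective ≤ dimensions` (`Res.DeintInv`). Measure of the loop: `td`. -/
structure AtHead (others : List Obj) (frames : List (Nat × FrameLayout)) (Blk : Block → Prop) (len : Nat) (u₀ : State)
    (ret : Word) (e : State) (ci pi eff : Nat) (td : Int) (v : State) : Prop where
  rip : v.rip = L.codebook_decode_deinterleave_repeat.cut9
  common : Common others frames Blk len u₀ ret e v
  locals : Locals e v ci pi eff td
  inv : Res.DeintInv ci pi (chOf e) (lenOf e) eff (dimOf e)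

/-- **What both arms start from, after the clamp** (FIX 5, FIX 10; CONTRACTS .3 / .4: "loop-1901 invariant after the clamp;
r14d = z·dimensions, 0 ≤ r14d, r14d + effective ≤ N·dimensions; 1 ≤ r15d = effective; pos + effective ≤ len·ch"): the whole round
of `eff` elements fits, `zd = z·dimensions` with `0 ≤ z < N(c)`, and the loop test has seen `total_decode ≥ 1`. -/
structure Round (e : State) (ci pi eff zd : Nat) (td : Int) : Prop where
  inter : Res.InterOK ci pi (chOf e) (lenOf e)
  eff_pos : 1 ≤ eff
  eff_le : eff ≤ dimOf e
  /-- the clamp: `pos + effective ≤ len·ch` -/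
  room : pi * chOf e + ci + eff ≤ lenOf e * chOf e
  /-- `z < N(c)`, `effective ≤ dimensions`: every `multiplicands[z·dim + i]`, `i < effective`, is inside K6's block -/
  zd_le : zd + eff ≤ nOf e * dimOf e
  td_pos : 1 ≤ td

/-- **10DD59H, the entry of the sequence arm** (`last := 0.0`, `i := 0`, loop 1938): r14d = z·dimensions. -/
structure AtSeq (others : List Obj) (frames : List (Nat × FrameLayout)) (Blk : Block → Prop) (len : Nat) (u₀ : State)
    (ret : Word) (e : State) (ci pi eff zd : Nat) (td : Int) (v : State) : Prop where
  rip : v.rip = L.codebook_decode_deinterleave_repeat.cut6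
  common : Common others frames Blk len u₀ ret e v
  locals : Locals e v ci pi eff td
  zdReg : v.reg .r14 = UInt64.ofNat zd
  round : Round e ci pi eff zd td

/-- **10DD70H, the head of the non-sequence arm's loop 1946 at its first round** (CONTRACTS .4: "as .3 but z·dimensions in
[rsp+0x4], r13d = i = 0"). -/
structure AtPlain (others : List Obj) (frames : List (Nat × FrameLayout)) (Blk : Block → Prop) (len : Nat) (u₀ : State)
    (ret : Word) (e : State) (ci pi eff zd : Nat) (td : Int) (v : State) : Prop where
  rip : v.rip = L.codebook_decode_deinterleave_repeat.cut7
  common : Common others frames Blk len u₀ ret e v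
  locals : Locals e v ci pi eff td
  /-- `[rsp+4]` = z·dimensions (dword) -/
  zdSlot : v.mem.readLE (e.reg .rsp - 100) 4 = zd
  /-- r13d = i = 0 -/
  iReg : v.reg .r13 = 0
  round : Round e ci pi eff zd td

/-- **10DE04H, gcc's join of both arms** (CONTRACTS .5: "loop-1901 invariant with pos advanced by effective (pos ≤ len·ch);
1 ≤ r15d ≤ dimensions ≤ 65535; [rsp+0x78] ≥ 1"): `ci`, `pi` are the NEW position. -/
structure AtJoin (others : List Obj) (frames : List (Nat × FrameLayout)) (Blk : Block → Prop) (len : Nat) (u₀ : State)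
    (ret : Word) (e : State) (ci pi eff : Nat) (td : Int) (v : State) : Prop where
  rip : v.rip = L.codebook_decode_deinterleave_repeat.cut8
  common : Common others frames Blk len u₀ ret e v
  locals : Locals e v ci pi eff td
  inv : Res.DeintInv ci pi (chOf e) (lenOf e) eff (dimOf e)
  td_pos : 1 ≤ td

/-- **10DF30H, the store-back** (`total_decode ≤ 0`; CONTRACTS .6: "ebp = c_inter, [rsp+0x8] = p_inter, [rsp+0x20] / [rsp+0x28]
= the two pointers, bounds of the loop invariant"). -/
structure AtStore (others : List Obj) (frames : List (Nat × FrameLayout)) (Blk : Block → Prop) (len : Nat) (u₀ : State)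
    (ret : Word) (e : State) (ci pi : Nat) (v : State) : Prop where
  rip : v.rip = L.codebook_decode_deinterleave_repeat.cut10
  common : Common others frames Blk len u₀ ret e v
  ciReg : v.reg .rbp = UInt64.ofNat ci
  piSlot : v.mem.readLE (e.reg .rsp - 96) 4 = pi
  inter : Res.InterOK ci pi (chOf e) (lenOf e)

/-- **10DF5FH, `if (f->last_seg) return FALSE`** (`z < 0`, no byte left in the segment, last segment): "nothing needed" but the
frame and that the two ints are untouched. -/
structure AtFalse1 (others : List Obj) (frames : List (Nat × FrameLayout)) (Blk : Block → Prop) (len : Nat) (u₀ : State)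
    (ret : Word) (e v : State) : Prop where
  rip : v.rip = L.codebook_decode_deinterleave_repeat.cut11
  common : Common others frames Blk len u₀ ret e v

/-- **10DF69H, FIX 10's `if (effective <= 0) return FALSE`**. -/
structure AtFalse2 (others : List Obj) (frames : List (Nat × FrameLayout)) (Blk : Block → Prop) (len : Nat) (u₀ : State)
    (ret : Word) (e v : State) : Prop where
  rip : v.rip = L.codebook_decode_deinterleave_repeat.cut12
  common : Common others frames Blk len u₀ ret e v

/-- **10DC9EH, the epilogue** (CONTRACTS .7: "eax = result; saved registers intact"): the contract's postcondition already
holds, with rax for the result — the epilogue writes no memory. -/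
structure AtEpilogue (others : List Obj) (frames : List (Nat × FrameLayout)) (Blk : Block → Prop) (len : Nat) (u₀ : State)
    (ret : Word) (e v : State) : Prop where
  rip : v.rip = L.codebook_decode_deinterleave_repeat.cut3
  mid : Mid u₀ (codebook_decode_deinterleave_repeat.spec others frames Blk len)
    L.codebook_decode_deinterleave_repeat.entry ret e (e.reg .rsp - 104) v
  reader : ReaderPost Blk len e.mem v.mem (fOf e)
  result : v.reg .rax = 0 ∨ v.reg .rax = 1
  /-- result 1: the two ints were stored and CI holds of them -/
  one : v.reg .rax = 1 → InterAt v.mem (cpOf e) (ppOf e) (chOf e) (lenOf e)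
  /-- result 0: the two ints are as at entry -/
  zero : v.reg .rax = 0 →
    v.mem.i32 (cpOf e) = e.mem.i32 (cpOf e) ∧ v.mem.i32 (ppOf e) = e.mem.i32 (ppOf e)

/-! ### The claims of the seven segments -/

/-- **Segment .1** (10DBC0H – 10DC3CH; C lines 1893 – 1899): prologue, load `c_inter` / `p_inter` / `dimensions`, the
`lookup_type` test, the spills. Exits: the loop head with `effective = dimensions` and the entry values of the two ints and of
`total_decode`; or, `lookup_type = 0`, the epilogue with eax = 0 after `error(f, 21)`. -/
def Claim1 (Lay : Layout) (μ : Microarch) (u₀ : State) : Prop :=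
  ∀ (others : List Obj) (frames : List (Nat × FrameLayout)) (Blk : Block → Prop) (len : Nat) (ret : Word) (e : State),
    AtEntry (conv u₀) L.codebook_decode_deinterleave_repeat.entry
      (codebook_decode_deinterleave_repeat.spec others frames Blk len).frame ret e →
    DeintPre others frames Blk len e →
    ReachVia Lay μ WayInv e (fun v =>
      (∃ ci pi td, AtHead others frames Blk len u₀ ret e ci pi (dimOf e) td v) ∨
      AtEpilogue others frames Blk len u₀ ret e v)

/-- **Segment .2** (10DE09H – 10DF2BH + 10DC3EH – 10DC48H + 10DC4DH – 10DC99H + 10DCADH – 10DCBDH; C lines 1901 – 1937): the loop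
test, the inline DECODE_VQ (prep_huffman when `valid_bits ≤ 9`; the fast table, K5; codebook_decode_scalar_raw on a miss), the
`z < 0` exits, the clamp (FIX 5, FIX 10), `z *= dimensions`, the `sequence_p` dispatch. `total_decode ≤ 0` → the store-back; a
round → one of the two arms with `effective' ≤ effective` and `total_decode ≥ 1`. -/
def Claim2 (Lay : Layout) (μ : Microarch) (u₀ : State) : Prop :=
  ∀ (others : List Obj) (frames : List (Nat × FrameLayout)) (Blk : Block → Prop) (len : Nat) (ret : Word) (e u : State)
    (ci pi eff : Nat) (td : Int),
    AtHead others frames Blk len u₀ ret e ci pi eff td u →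
    ReachVia Lay μ WayInv u (fun v =>
      AtStore others frames Blk len u₀ ret e ci pi v ∨
      (∃ eff' zd, AtSeq others frames Blk len u₀ ret e ci pi eff' zd td v) ∨
      (∃ eff' zd, AtPlain others frames Blk len u₀ ret e ci pi eff' zd td v) ∨
      AtFalse1 others frames Blk len u₀ ret e v ∨
      AtFalse2 others frames Blk len u₀ ret e v ∨
      AtEpilogue others frames Blk len u₀ ret e v)

/-- **Segment .3** (10DCC2H – 10DD67H; C lines 1902, 1938 – 1943): the sequence arm, loop 1938 (`Res.DeintInner`, measure
`effective − i`): `effective` floats added at the positions `pos … pos + effective − 1`. -/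
def Claim3 (Lay : Layout) (μ : Microarch) (u₀ : State) : Prop :=
  ∀ (others : List Obj) (frames : List (Nat × FrameLayout)) (Blk : Block → Prop) (len : Nat) (ret : Word) (e u : State)
    (ci pi eff zd : Nat) (td : Int),
    AtSeq others frames Blk len u₀ ret e ci pi eff zd td u →
    ReachVia Lay μ WayInv u (fun v => ∃ ci' pi', AtJoin others frames Blk len u₀ ret e ci' pi' eff td v)

/-- **Segment .4** (10DD6CH – 10DDFFH; C lines 1946 – 1951): the non-sequence arm, loop 1946 (entered at its head). -/
def Claim4 (Lay : Layout) (μ : Microarch) (u₀ : State) : Prop :=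
  ∀ (others : List Obj) (frames : List (Nat × FrameLayout)) (Blk : Block → Prop) (len : Nat) (ret : Word) (e u : State)
    (ci pi eff zd : Nat) (td : Int),
    AtPlain others frames Blk len u₀ ret e ci pi eff zd td u →
    ReachVia Lay μ WayInv u (fun v => ∃ ci' pi', AtJoin others frames Blk len u₀ ret e ci' pi' eff td v)

/-- **Segment .5** (10DE04H, one instruction; C line 1955): `total_decode -= effective`, IN PLACE IN THE ARGUMENT SLOT
`[e.rsp + 16, e.rsp + 20)` (a window of the contract's footprint; no live object is there: `DeintPre.args`). `1 ≤ td < 2^31` and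
`effective ≤ 65535`: the 32-bit subtraction does not wrap. -/
def Claim5 (Lay : Layout) (μ : Microarch) (u₀ : State) : Prop :=
  ∀ (others : List Obj) (frames : List (Nat × FrameLayout)) (Blk : Block → Prop) (len : Nat) (ret : Word) (e u : State)
    (ci pi eff : Nat) (td : Int),
    AtJoin others frames Blk len u₀ ret e ci pi eff td u →
    ReachVia Lay μ WayInv u (fun v => AtHead others frames Blk len u₀ ret e ci pi eff (td - eff) v)

/-- **Segment .6** (10DF30H – 10DF6EH; C lines 1957 – 1959, 1909, 1918), THREE entries: the store-back `*c_inter_p = c_inter`,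
`*p_inter_p = p_inter`, eax := 1 (CI of the stored ints is the contract's result-1 post); the two `eax := 0` stubs. -/
def Claim6 (Lay : Layout) (μ : Microarch) (u₀ : State) : Prop :=
  ∀ (others : List Obj) (frames : List (Nat × FrameLayout)) (Blk : Block → Prop) (len : Nat) (ret : Word) (e u : State),
    ((∃ ci pi, AtStore others frames Blk len u₀ ret e ci pi u) ∨
      AtFalse1 others frames Blk len u₀ ret e u ∨ AtFalse2 others frames Blk len u₀ ret e u) →
    ReachVia Lay μ WayInv u (fun v => AtEpilogue others frames Blk len u₀ ret e v)

/-- **Segment .7** (10DC9EH – 10DCACH; C line 1960): `add rsp, 38H`, six pops, `ret`. -/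
def Claim7 (Lay : Layout) (μ : Microarch) (u₀ : State) : Prop :=
  ∀ (others : List Obj) (frames : List (Nat × FrameLayout)) (Blk : Block → Prop) (len : Nat) (ret : Word) (e u : State),
    AtEpilogue others frames Blk len u₀ ret e u →
    ReachVia Lay μ WayInv u
      (Returned (conv u₀) (codebook_decode_deinterleave_repeat.spec others frames Blk len) e ret)

end Vorbis.Spec.Deint
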